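-- pv_equiv track=rewrite | github.com/DNA-intelligence/DNA_CERTIFICATE | rsa.py | del_base
-- ===== SOURCE A (Python) =====
-- def del_base(dna:str) -> str:
--     if len(dna)%6!=0:
--         res_nu = len(dna)%6
--         dna = del_base(dna[:-res_nu])+dna[-res_nu:]
--         return dna
--
--     dna = dna.upper()
--     group = int(len(dna)/6)
--     dna_res = ""
--     for i in range(group):
--         base5 = dna[i*6:i*6+5]
--         dna_res += base5
--     return dna_res
-- ===== SOURCE B (Python) =====
-- def del_base(dna: str) -> str:
--     rem = len(dna) % 6
--     cut = len(dna) - rem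
--     body = dna[:cut].upper()
--     return ''.join(c for i, c in enumerate(body) if i % 6 != 5) + dna[cut:]
-- ===== Notes on version B (the rewrite author's own statement) =====
-- stated objective: simpler
-- what changed: Replaces A's single-level recursion over the remainder plus a per-group 5-character slicing loop by one flat pass: split off the length%6 tail, uppercase the body only, and keep every character whose index mod 6 is not 5.
import Mathlib
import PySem

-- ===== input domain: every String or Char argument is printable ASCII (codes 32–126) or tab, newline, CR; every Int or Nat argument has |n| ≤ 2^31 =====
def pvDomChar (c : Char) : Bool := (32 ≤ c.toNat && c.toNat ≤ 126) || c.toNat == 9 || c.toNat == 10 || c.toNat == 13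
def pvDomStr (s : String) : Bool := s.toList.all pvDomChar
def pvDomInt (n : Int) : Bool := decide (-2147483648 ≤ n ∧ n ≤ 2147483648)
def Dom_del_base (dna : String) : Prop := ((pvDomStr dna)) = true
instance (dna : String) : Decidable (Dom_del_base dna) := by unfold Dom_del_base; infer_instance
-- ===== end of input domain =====

-- B replaces A's single-level recursion + per-group 5-char slicing by one flat pass:
-- split off the remainder, uppercase the body only, and keep the characters whose index mod 6 is not 5 (objective: simpler).

-- ===== PORT A =====
-- literal port of A over the code-point list; `int(len(dna)/6)` is ported as len/6, exact since len is a non-negative multiple of 6 in that branch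
def delBaseAList (cs : List Char) : List Char :=
  if _h : cs.length % 6 ≠ 0 then
    let res_nu := cs.length % 6
    delBaseAList (PySem.List.slice cs none (some (-(res_nu : Int)))) ++
      PySem.List.slice cs (some (-(res_nu : Int))) none
  else
    let dna := PySem.Chars.upper cs
    let group := cs.length / 6
    (PySem.List.pyRange 0 (group : Int) 1).foldl
      (fun acc i => acc ++ PySem.List.slice dna (some (i * 6)) (some (i * 6 + 5))) []
termination_by cs.length
decreasing_by
  rw [PySem.List.slice_to_neg_natCast cs (cs.length % 6) (by omega)]
  simp [List.length_take]
  omega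

def del_base (dna : String) : String := String.ofList (delBaseAList dna.toList)

-- ===== PORT B =====
def delBaseBList (cs : List Char) : List Char :=
  let rem := cs.length % 6
  let cut := cs.length - rem
  let body := PySem.Chars.upper (PySem.List.slice cs none (some (cut : Int)))
  ((PySem.List.enumerate body 0).filter (fun p => decide (PySem.Int.mod p.1 6 ≠ 5))).map (·.2) ++
    PySem.List.slice cs (some (cut : Int)) none

def del_base_alt (dna : String) : String := String.ofList (delBaseBList dna.toList)

-- ===== PRECONDITION & SPEC =====
def Spec_del_base (dna : String) (out : String) : Prop := out = del_base_alt dna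
instance (dna : String) (out : String) : Decidable (Spec_del_base dna out) := by unfold Spec_del_base; infer_instance

-- ===== CLAIM (what is proved, stated in full; the proofs are below) =====
def Claim_equal_del_base : Prop := ∀ (dna : String), Dom_del_base dna → Spec_del_base dna (del_base dna)

-- ===== LEMMAS AND PROOFS =====

-- "keep the first 5 of every 6 characters": common characterisation of both programs on a body of length divisible by 6
def keep5 : List Char → List Char
  | c0 :: c1 :: c2 :: c3 :: c4 :: _ :: rest => c0 :: c1 :: c2 :: c3 :: c4 :: keep5 rest
  | l => l

lemma mod6_shift (m k : Int) : (6 * m + k) % 6 = k % 6 := by omega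

-- B's enumerate-filter pass, started at any index divisible by 6, is keep5
lemma E_keep5_aux : ∀ (n : Nat) (l : List Char), l.length = n → ∀ (m : Nat), n % 6 = 0 →
    (((PySem.List.enumerate l ((6 * m : Nat) : Int)).filter
        (fun p => decide (PySem.Int.mod p.1 6 ≠ 5))).map (·.2)) = keep5 l := by
  intro n
  induction n using Nat.strong_induction_on with
  | _ n ih =>
    intro l hl m h
    rcases l with _ | ⟨a, _ | ⟨b, _ | ⟨c, _ | ⟨d, _ | ⟨e, _ | ⟨f, rest⟩⟩⟩⟩⟩⟩
    · simp [keep5]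
    all_goals try (exfalso; simp at hl; omega)
    have hn : rest.length + 6 = n := by simpa using hl
    have hrest := ih (n - 6) (by omega) rest (by omega) (m + 1) (by omega)
    norm_num [PySem.List.enumerate_cons, mod6_shift, add_assoc, keep5]
    rw [show ((6 * (m + 1) : Nat) : Int) = 6 * (m : Int) + 6 from by push_cast; ring] at hrest
    simpa using hrest

lemma keep5_append : ∀ (n : Nat) (a b : List Char), a.length = n → n % 6 = 0 →
    keep5 (a ++ b) = keep5 a ++ keep5 b := by
  intro n
  induction n using Nat.strong_induction_on with
  | _ n ih =>
    intro a b hl h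
    rcases a with _ | ⟨x0, _ | ⟨x1, _ | ⟨x2, _ | ⟨x3, _ | ⟨x4, _ | ⟨x5, rest⟩⟩⟩⟩⟩⟩
    · simp [keep5]
    all_goals try (exfalso; simp at hl; omega)
    have hn : rest.length + 6 = n := by simpa using hl
    have := ih (n - 6) (by omega) rest b (by omega) (by omega)
    simp only [List.cons_append, keep5, this]

-- A's slice-accumulating loop is keep5 of the first 6*g characters
lemma F_keep5 : ∀ (g : Nat) (u : List Char), 6 * g ≤ u.length →
    (List.range g).foldl (fun acc j => acc ++ (u.drop (6 * j)).take 5) [] = keep5 (u.take (6 * g)) := by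
  intro g
  induction g with
  | zero => intro u _; simp [keep5]
  | succ g ih =>
    intro u hle
    rw [List.range_succ, List.foldl_append]
    simp only [List.foldl_cons, List.foldl_nil]
    rw [ih u (by omega)]
    have htake : u.take (6 * (g + 1)) = u.take (6 * g) ++ ((u.drop (6 * g)).take 6) := by
      rw [show 6*(g+1) = 6*g+6 from by ring, List.take_add]
    rw [htake, keep5_append ((u.take (6*g)).length) _ _ rfl (by simp; omega)]
    congr 1
    have hlen : ((u.drop (6 * g)).take 6).length = 6 := by simp; omega
    rcases h6 : (u.drop (6 * g)).take 6 with _ | ⟨y0, _ | ⟨y1, _ | ⟨y2, _ | ⟨y3, _ | ⟨y4, _ | ⟨y5, r⟩⟩⟩⟩⟩⟩ <;>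
      rw [h6] at hlen <;> simp at hlen
    · have : r = [] := by simpa using hlen
      subst this
      have : (u.drop (6 * g)).take 5 = [y0,y1,y2,y3,y4] := by
        have := congrArg (List.take 5) h6
        simpa [List.take_take] using this
      simp [keep5, this]

lemma A_even (cs : List Char) (h : cs.length % 6 = 0) :
    delBaseAList cs = keep5 (PySem.Chars.upper cs) := by
  rw [delBaseAList]
  simp only [h, ne_eq, not_true_eq_false, not_false_eq_true, dif_neg]
  rw [PySem.List.pyRange_zero_natCast, List.foldl_map]
  have hfun : (fun (acc : List Char) (k : Nat) => acc ++ PySem.List.slice (PySem.Chars.upper cs) (some ((k:Int) * 6)) (some ((k:Int) * 6 + 5)))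
      = fun acc k => acc ++ ((PySem.Chars.upper cs).drop (6 * k)).take 5 := by
    funext acc k
    rw [show ((k:Int) * 6) = ((6 * k : Nat) : Int) from by push_cast; ring,
        show (((6 * k : Nat) : Int) + 5) = ((6 * k : Nat) : Int) + ((5 : Nat) : Int) from by norm_num,
        PySem.List.slice_natCast_add]
  rw [hfun, F_keep5 (cs.length / 6) _ (by simp [PySem.Chars.upper]; omega)]
  rw [show 6 * (cs.length / 6) = (PySem.Chars.upper cs).length from by simp [PySem.Chars.upper]; omega,
      List.take_length]

theorem main_eq (cs : List Char) : delBaseAList cs = delBaseBList cs := by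
  have hB : delBaseBList cs
      = keep5 (PySem.Chars.upper (cs.take (cs.length - cs.length % 6))) ++ cs.drop (cs.length - cs.length % 6) := by
    unfold delBaseBList
    dsimp only
    rw [PySem.List.slice_to_natCast, PySem.List.slice_from_natCast]
    congr 1
    have hlen : (PySem.Chars.upper (cs.take (cs.length - cs.length % 6))).length % 6 = 0 := by
      simp [PySem.Chars.upper]; omega
    have := E_keep5_aux _ _ rfl 0 hlen
    simpa using this
  by_cases h : cs.length % 6 = 0
  · rw [hB]
    simp only [h, Nat.sub_zero, List.take_length, List.drop_length, List.append_nil]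
    exact A_even cs h
  · rw [delBaseAList]
    simp only [h, ne_eq, not_false_eq_true, dif_pos]
    rw [PySem.List.slice_to_neg_natCast cs (cs.length % 6) (by omega),
        PySem.List.slice_from_neg_natCast cs (cs.length % 6) (by omega)]
    rw [hB]
    congr 1
    rw [A_even _ (by simp [List.length_take]; omega)]

-- ===== VERDICT (by name: the statement is the Claim_ definition above) =====
theorem del_base_spec : Claim_equal_del_base := by
  intro dna _
  unfold Spec_del_base del_base del_base_alt
  rw [main_eq]
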